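-- pv_equiv track=rewrite | github.com/tsepanx/scripts-and-builtins | ai_hw2/TsepaStepan.py | determine_best_style
-- ===== SOURCE A (Python) =====
-- from typing import Iterable
--
-- STYLE_MAJOR_STEPS = [0, 2, 2, 1, 2, 2, 2]
--
-- STYLE_MINOR_STEPS = [0, 2, 1, 2, 2, 1, 2]
--
-- def get_style(lead_note: int, is_major=True):
--     """
--     :return: get style notes by leading note and major/minor type
--     """
--     step_list = STYLE_MAJOR_STEPS if is_major else STYLE_MINOR_STEPS
--     return [(lead_note + sum(step_list[: i + 1])) % 12 for i in range(len(step_list))]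
--
-- def determine_best_style(notes: Iterable[int]):
--     """
--     Determine best style with maximum intersection of its notes with song notes
--     :param notes: song notes
--     :return: best style notes list
--     """
--     notes = list(map(lambda x: x % 12, notes))
--
--     possible_styles = []
--     for note in notes:
--         major_style = get_style(note, is_major=True)
--         minor_style = get_style(note, is_major=False)
--
--         possible_styles.extend((major_style, minor_style))
--
--     def rate_style(style: [int]) -> int:
--         res = len(set(notes).intersection(set(style)))
--         return res
--
--     possible_styles.sort(key=rate_style, reverse=True)
--     return possible_styles[0]
-- ===== SOURCE B (Python) =====
-- _MAJOR_OFFSETS = [0, 2, 4, 5, 7, 9, 11]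
-- _MINOR_OFFSETS = [0, 2, 3, 5, 7, 8, 10]
--
--
-- def determine_best_style(notes):
--     """Score-table reformulation: one inverted voting pass over the distinct
--     pitch classes builds per-lead major/minor intersection counts, then a
--     single scan over the notes picks the first best (lead, mode)."""
--     pcs = [n % 12 for n in notes]
--     maj = [0] * 12
--     mnr = [0] * 12
--     for q in set(pcs):
--         for off in _MAJOR_OFFSETS:
--             maj[(q - off) % 12] += 1
--         for off in _MINOR_OFFSETS:
--             mnr[(q - off) % 12] += 1
--     best_lead = pcs[0]
--     best_major = True
--     best = maj[best_lead]
--     for p in pcs: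
--         if maj[p] > best:
--             best, best_lead, best_major = maj[p], p, True
--         if mnr[p] > best:
--             best, best_lead, best_major = mnr[p], p, False
--     offs = _MAJOR_OFFSETS if best_major else _MINOR_OFFSETS
--     return [(best_lead + o) % 12 for o in offs]
-- ===== Notes on version B (the rewrite author's own statement) =====
-- stated objective: faster
-- what changed: Instead of generating 2n candidate style lists, rating each by rebuilding set(notes) and intersecting, and stably sorting them, B builds two length-12 score tables by one inverted voting pass over the distinct pitch classes and then picks the first maximal (lead, mode) in a single scan, reconstructing the style list at the end.
-- outside the precondition, e.g. on determine_best_style([]): A raises IndexError, B raises IndexError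
import Mathlib
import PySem

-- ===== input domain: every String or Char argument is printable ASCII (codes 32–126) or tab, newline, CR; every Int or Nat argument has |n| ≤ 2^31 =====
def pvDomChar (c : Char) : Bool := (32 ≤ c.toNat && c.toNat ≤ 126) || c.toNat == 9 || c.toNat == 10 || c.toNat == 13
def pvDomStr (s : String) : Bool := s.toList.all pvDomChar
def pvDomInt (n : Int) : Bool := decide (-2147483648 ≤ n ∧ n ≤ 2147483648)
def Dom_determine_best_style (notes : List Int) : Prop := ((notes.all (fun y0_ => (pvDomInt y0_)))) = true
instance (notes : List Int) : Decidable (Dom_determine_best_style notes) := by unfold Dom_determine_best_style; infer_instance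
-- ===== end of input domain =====

-- B replaces A's "rate 2n candidate styles by set intersection, stable-sort, take head"
-- with two length-12 score tables filled by an inverted voting pass plus one selection scan (asymptotically faster).

-- ===== PORT A =====
def pvStyleMajorSteps : List Int := [0, 2, 2, 1, 2, 2, 2]
def pvStyleMinorSteps : List Int := [0, 2, 1, 2, 2, 1, 2]

def get_style (lead_note : Int) (is_major : Bool) : List Int :=
  let step_list := if is_major then pvStyleMajorSteps else pvStyleMinorSteps
  (PySem.List.pyRange 0 (PySem.List.len step_list) 1).map
    (fun i => PySem.Int.mod (lead_note + (PySem.List.slice step_list none (some (i + 1))).sum) 12)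

-- rate_style (A's nested helper): len(set(notes).intersection(set(style)))
def pvRate (notes2 : List Int) (style : List Int) : Int :=
  ((PySem.Set.inter (PySem.Set.ofList notes2) (PySem.Set.ofList style)).length : Int)

def determine_best_style (notes : List Int) : List Int :=
  let notes2 := notes.map (fun x => PySem.Int.mod x 12)
  let possible_styles := notes2.foldl
    (fun acc note => acc ++ [get_style note true, get_style note false]) []
  -- possible_styles.sort(key=rate_style, reverse=True); return possible_styles[0]
  (PySem.List.pyGet? (PySem.List.sorted possible_styles (pvRate notes2) true) 0).getD []

-- ===== PORT B =====
def pvMajorOffsets : List Int := [0, 2, 4, 5, 7, 9, 11]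
def pvMinorOffsets : List Int := [0, 2, 3, 5, 7, 8, 10]

-- tab[(q-off)%12] += 1
def pvBump (tab : List Int) (i : Int) : List Int :=
  PySem.List.pySetD tab i (PySem.List.pyGetD tab i 0 + 1)

def determine_best_style_alt (notes : List Int) : List Int :=
  let pcs := notes.map (fun n => PySem.Int.mod n 12)
  let tabs := (PySem.Set.ofList pcs).foldl
    (fun (t : List Int × List Int) q =>
      (pvMajorOffsets.foldl (fun tb off => pvBump tb (PySem.Int.mod (q - off) 12)) t.1,
       pvMinorOffsets.foldl (fun tb off => pvBump tb (PySem.Int.mod (q - off) 12)) t.2))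
    (List.replicate 12 0, List.replicate 12 0)
  let lead0 := PySem.List.pyGetD pcs 0 0
  let st := pcs.foldl
    (fun (s : Int × Int × Bool) p =>
      let s1 := if PySem.List.pyGetD tabs.1 p 0 > s.1 then (PySem.List.pyGetD tabs.1 p 0, p, true) else s
      if PySem.List.pyGetD tabs.2 p 0 > s1.1 then (PySem.List.pyGetD tabs.2 p 0, p, false) else s1)
    (PySem.List.pyGetD tabs.1 lead0 0, lead0, true)
  (if st.2.2 then pvMajorOffsets else pvMinorOffsets).map (fun o => PySem.Int.mod (st.2.1 + o) 12)

-- ===== PRECONDITION & SPEC =====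
-- On notes == [] both A and B raise IndexError (possible_styles[0] / pcs[0]); Pre_ excludes exactly that.
def Pre_determine_best_style (notes : List Int) : Prop := notes ≠ []
instance (notes : List Int) : Decidable (Pre_determine_best_style notes) := by unfold Pre_determine_best_style; infer_instance
def pvWitness_determine_best_style : List Int := ([60, 62, 64])
def Spec_determine_best_style (notes : List Int) (out : List Int) : Prop := out = determine_best_style_alt notes
instance (notes : List Int) (out : List Int) : Decidable (Spec_determine_best_style notes out) := by unfold Spec_determine_best_style; infer_instance

-- ===== CLAIM (what is proved, stated in full; the proofs are below) =====
def Claim_equal_determine_best_style : Prop := ∀ (notes : List Int), Dom_determine_best_style notes → Pre_determine_best_style notes → Spec_determine_best_style notes (determine_best_style notes)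

-- ===== LEMMAS AND PROOFS =====

theorem pv_insertBy_cons {α : Type} (bef : α → α → Bool) (x h : α) (t : List α) :
    PySem.List.insertBy bef x (h :: t) =
      if bef x h then x :: h :: t else h :: PySem.List.insertBy bef x t := by
  simp [PySem.List.insertBy]

theorem pv_head_foldl_insertBy {α : Type} (bef : α → α → Bool) :
    ∀ (xs : List α) (h : α) (t : List α),
      (xs.foldl (fun acc x => PySem.List.insertBy bef x acc) (h :: t)).head? =
        some (xs.foldl (fun b x => if bef x b then x else b) h)
  | [], h, t => rfl
  | x :: xs, h, t => by
      simp only [List.foldl_cons, pv_insertBy_cons]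
      by_cases hb : bef x h
      · simp only [hb, if_true]
        exact pv_head_foldl_insertBy bef xs x (h :: t)
      · simp only [hb, Bool.false_eq_true, if_false]
        exact pv_head_foldl_insertBy bef xs h (PySem.List.insertBy bef x t)

theorem pv_sorted_rev_head {α : Type} (key : α → Int) (s0 : α) (ss : List α) :
    (PySem.List.sorted (s0 :: ss) key true).head? =
      some (ss.foldl (fun b x => if key b < key x then x else b) s0) := by
  rw [PySem.List.sorted_rev_eq_foldl_insertBy]
  simp only [List.foldl_cons]
  have h0 : PySem.List.insertBy (fun a b => decide (key b < key a)) s0 [] = [s0] := rfl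
  rw [h0, pv_head_foldl_insertBy]
  simp

theorem pv_foldl_map_pick {α : Type} (key : List Int → Int) (f : α → List Int) :
    ∀ (ds : List α) (d0 : α),
      (ds.map f).foldl (fun b s => if key b < key s then s else b) (f d0) =
        f (ds.foldl (fun b d => if key (f b) < key (f d) then d else b) d0)
  | [], _ => rfl
  | d :: ds, d0 => by
      simp only [List.map_cons, List.foldl_cons]
      by_cases h : key (f d0) < key (f d)
      · simp only [if_pos h]; exact pv_foldl_map_pick key f ds d
      · simp only [if_neg h]; exact pv_foldl_map_pick key f ds d0

theorem pv_bump_len (tab : List Int) (i : Int) :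
    (pvBump tab i).length = tab.length := by
  unfold pvBump
  cases h : PySem.List.pyIdx? tab.length i <;>
    simp [PySem.List.pySetD, PySem.List.pySet?, h]

theorem pv_bump_get (tab : List Int) (i p : Int) (hi0 : 0 ≤ i) (hi : i < (tab.length : Int))
    (hp0 : 0 ≤ p) (hp : p < (tab.length : Int)) :
    PySem.List.pyGetD (pvBump tab i) p 0 =
      PySem.List.pyGetD tab p 0 + (if i = p then 1 else 0) := by
  have hset : PySem.List.pySetD tab i (PySem.List.pyGetD tab i 0 + 1)
      = tab.set i.toNat (PySem.List.pyGetD tab i 0 + 1) := by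
    simp [PySem.List.pySetD, PySem.List.pySet?, PySem.List.pyIdx?, hi0, hi]
  have hlen : ((tab.set i.toNat (PySem.List.pyGetD tab i 0 + 1)).length : Int) = tab.length := by simp
  unfold pvBump
  rw [hset, PySem.List.pyGetD_eq_getElem _ _ hp0 (by omega),
      PySem.List.pyGetD_eq_getElem _ _ hp0 hp, List.getElem_set]
  by_cases h : i = p
  · subst h
    simp [PySem.List.pyGetD_eq_getElem _ _ hi0 hi]
  · have hne : i.toNat ≠ p.toNat := by omega
    simp [hne, h]

theorem pv_inner_len (q : Int) :
    ∀ (offs : List Int) (tab : List Int),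
      ((offs.foldl (fun tb off => pvBump tb (PySem.Int.mod (q - off) 12)) tab)).length = tab.length
  | [], _ => rfl
  | off :: offs, tab => by
      simp only [List.foldl_cons]
      rw [pv_inner_len q offs, pv_bump_len]

theorem pv_inner_get (q : Int) :
    ∀ (offs : List Int) (tab : List Int), tab.length = 12 →
      ∀ (p : Int), 0 ≤ p → p < 12 →
      PySem.List.pyGetD (offs.foldl (fun tb off => pvBump tb (PySem.Int.mod (q - off) 12)) tab) p 0 =
        PySem.List.pyGetD tab p 0 + (offs.countP (fun off => PySem.Int.mod (q - off) 12 == p) : Int)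
  | [], tab, _, p, _, _ => by simp
  | off :: offs, tab, htab, p, hp0, hp => by
      simp only [List.foldl_cons]
      have hb0 : (0:Int) ≤ PySem.Int.mod (q - off) 12 := PySem.Int.mod_nonneg _ (by norm_num)
      have hb1 : PySem.Int.mod (q - off) 12 < 12 := PySem.Int.mod_lt _ (by norm_num)
      rw [pv_inner_get q offs (pvBump tab _) (by rw [pv_bump_len, htab]) p hp0 hp,
          pv_bump_get tab _ p hb0 (by omega) hp0 (by omega),
          List.countP_cons]
      by_cases h : PySem.Int.mod (q - off) 12 = p
      · simp only [h, beq_self_eq_true, if_true]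
        push_cast; ring
      · have hb : (PySem.Int.mod (q - off) 12 == p) = false := beq_eq_false_iff_ne.mpr h
        simp only [h, if_false, hb]
        push_cast; ring

theorem pv_outer_len (offs : List Int) :
    ∀ (qs : List Int) (tab : List Int),
      (qs.foldl (fun t q => offs.foldl (fun tb off => pvBump tb (PySem.Int.mod (q - off) 12)) t) tab).length
        = tab.length
  | [], _ => rfl
  | q :: qs, tab => by
      simp only [List.foldl_cons]
      rw [pv_outer_len offs qs, pv_inner_len]

theorem pv_outer_get (offs : List Int) :
    ∀ (qs : List Int) (tab : List Int), tab.length = 12 →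
      ∀ (p : Int), 0 ≤ p → p < 12 →
      PySem.List.pyGetD
          (qs.foldl (fun t q => offs.foldl (fun tb off => pvBump tb (PySem.Int.mod (q - off) 12)) t) tab) p 0 =
        PySem.List.pyGetD tab p 0 +
          (qs.map (fun q => (offs.countP (fun off => PySem.Int.mod (q - off) 12 == p) : Int))).sum
  | [], tab, _, p, _, _ => by simp
  | q :: qs, tab, htab, p, hp0, hp => by
      simp only [List.foldl_cons, List.map_cons, List.sum_cons]
      rw [pv_outer_get offs qs _ (by rw [pv_inner_len, htab]) p hp0 hp,
          pv_inner_get q offs tab htab p hp0 hp]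
      ring

theorem pv_count_eq_mem (q p : Int) (hq0 : 0 ≤ q) (hq : q < 12) (hp0 : 0 ≤ p) (hp : p < 12) (m : Bool) :
    ((if m then pvMajorOffsets else pvMinorOffsets).countP
        (fun off => PySem.Int.mod (q - off) 12 == p) : Int) =
      if q ∈ get_style p m then 1 else 0 := by
  cases m <;> interval_cases q <;> interval_cases p <;> decide

theorem pv_rate_eq_count (notes2 style : List Int) :
    pvRate notes2 style =
      ((PySem.Set.ofList notes2).countP (fun q => decide (q ∈ style)) : Int) := by
  unfold pvRate
  rw [PySem.Set.inter]
  congr 1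
  rw [List.countP_eq_length_filter]
  congr 1
  apply List.filter_congr
  intro q _
  simp [PySem.Set.contains, PySem.Set.mem_ofList]

theorem pv_scan (score keyf : (Int × Bool) → Int) :
    ∀ (ds : List (Int × Bool)) (d0 : Int × Bool) (init : Int × Int × Bool),
      (∀ d ∈ ds, score d = keyf d) → score d0 = keyf d0 →
      init = (score d0, d0.1, d0.2) →
      ds.foldl (fun s d => if score d > s.1 then (score d, d.1, d.2) else s) init =
        (score (ds.foldl (fun b d => if keyf b < keyf d then d else b) d0),
         (ds.foldl (fun b d => if keyf b < keyf d then d else b) d0).1,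
         (ds.foldl (fun b d => if keyf b < keyf d then d else b) d0).2)
  | [], _, _, _, _, hinit => by subst hinit; rfl
  | d :: ds, d0, init, hds, hd0, hinit => by
      subst hinit
      simp only [List.foldl_cons]
      have hd : score d = keyf d := hds d (by simp)
      by_cases h : keyf d0 < keyf d
      · rw [if_pos (show score d > score d0 by rw [hd, hd0]; exact h), if_pos h]
        exact pv_scan score keyf ds d _ (fun x hx => hds x (by simp [hx])) hd rfl
      · rw [if_neg (show ¬ score d > score d0 by rw [hd, hd0]; exact h), if_neg h]
        exact pv_scan score keyf ds d0 _ (fun x hx => hds x (by simp [hx])) hd0 rfl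

theorem pv_double_step (maj mnr : List Int) :
    ∀ (pcs : List Int) (init : Int × Int × Bool),
      pcs.foldl (fun s p =>
          if PySem.List.pyGetD mnr p 0 >
              (if PySem.List.pyGetD maj p 0 > s.1 then (PySem.List.pyGetD maj p 0, p, true) else s).1
          then (PySem.List.pyGetD mnr p 0, p, false)
          else (if PySem.List.pyGetD maj p 0 > s.1 then (PySem.List.pyGetD maj p 0, p, true) else s)) init =
      (pcs.flatMap (fun p => [(p, true), (p, false)])).foldl
        (fun s d => if PySem.List.pyGetD (if d.2 then maj else mnr) d.1 0 > s.1
                    then (PySem.List.pyGetD (if d.2 then maj else mnr) d.1 0, d.1, d.2) else s) init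
  | [], _ => rfl
  | p :: pcs, init => by
      simp only [List.flatMap_cons, List.foldl_cons, List.cons_append,
        List.nil_append, if_true]
      exact pv_double_step maj mnr pcs _

theorem pv_get_style_eq (lead : Int) (m : Bool) :
    get_style lead m =
      (if m then pvMajorOffsets else pvMinorOffsets).map (fun o => PySem.Int.mod (lead + o) 12) := by
  cases m <;>
    norm_num [get_style, pvStyleMajorSteps, pvStyleMinorSteps, pvMajorOffsets, pvMinorOffsets,
      PySem.List.slice, PySem.List.pyRange, PySem.List.len] <;>
    simp [show Int.toNat 7 = 7 from rfl, List.range_succ, PySem.List.clampIdx]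

theorem pv_table_lookup (notes2 : List Int) (p : Int) (hp0 : 0 ≤ p) (hp : p < 12)
    (hq : ∀ q ∈ notes2, 0 ≤ q ∧ q < 12) (m : Bool) :
    PySem.List.pyGetD
        ((PySem.Set.ofList notes2).foldl
          (fun t q => (if m then pvMajorOffsets else pvMinorOffsets).foldl
              (fun tb off => pvBump tb (PySem.Int.mod (q - off) 12)) t)
          (List.replicate 12 0)) p 0
      = pvRate notes2 (get_style p m) := by
  rw [pv_outer_get _ _ _ (by simp) p hp0 hp]
  have hrep : PySem.List.pyGetD (List.replicate 12 (0:Int)) p 0 = 0 := by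
    rw [PySem.List.pyGetD_eq_getElem _ _ hp0 (by simp; omega)]
    apply List.getElem_replicate
  rw [hrep, zero_add, pv_rate_eq_count,
      List.map_congr_left (fun q hqmem => by
        obtain ⟨hq0, hq1⟩ := hq q ((PySem.Set.mem_ofList notes2 q).mp hqmem)
        exact pv_count_eq_mem q p hq0 hq1 hp0 hp m)]
  have := PySem.List.sum_map_ite_one_zero (fun q => decide (q ∈ get_style p m)) (PySem.Set.ofList notes2)
  simpa using this

theorem pv_main (n0 : Int) (nrest : List Int) :
    determine_best_style (n0 :: nrest) = determine_best_style_alt (n0 :: nrest) := by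
  simp only [determine_best_style, determine_best_style_alt, List.map_cons]
  generalize hp0 : PySem.Int.mod n0 12 = p0
  generalize hrest2 : nrest.map (fun x => PySem.Int.mod x 12) = rest2
  have hq : ∀ q ∈ (p0 :: rest2), 0 ≤ q ∧ q < 12 := by
    intro q hqm
    rcases List.mem_cons.mp hqm with h | h
    · subst h; rw [← hp0]
      exact ⟨PySem.Int.mod_nonneg _ (by norm_num), PySem.Int.mod_lt _ (by norm_num)⟩
    · rw [← hrest2] at h
      obtain ⟨x, _, rfl⟩ := List.mem_map.mp h
      exact ⟨PySem.Int.mod_nonneg _ (by norm_num), PySem.Int.mod_lt _ (by norm_num)⟩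
  clear hp0 hrest2
  rw [PySem.List.foldl_prod_mk
        (f := fun t1 q => pvMajorOffsets.foldl (fun tb off => pvBump tb (PySem.Int.mod (q - off) 12)) t1)
        (g := fun t2 q => pvMinorOffsets.foldl (fun tb off => pvBump tb (PySem.Int.mod (q - off) 12)) t2)]
  simp only
  set maj : List Int := (PySem.Set.ofList (p0 :: rest2)).foldl
      (fun t1 q => pvMajorOffsets.foldl (fun tb off => pvBump tb (PySem.Int.mod (q - off) 12)) t1)
      (List.replicate 12 0) with hmaj
  set mnr : List Int := (PySem.Set.ofList (p0 :: rest2)).foldl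
      (fun t2 q => pvMinorOffsets.foldl (fun tb off => pvBump tb (PySem.Int.mod (q - off) 12)) t2)
      (List.replicate 12 0) with hmnr
  rw [PySem.List.foldl_append_eq_flatMap, List.nil_append, PySem.List.pyGetD_zero_cons,
      pv_double_step]
  have hds : (p0 :: rest2).flatMap (fun p => [(p, true), (p, false)])
      = (p0, true) :: (p0, false) :: rest2.flatMap (fun p => [(p, true), (p, false)]) := by
    simp
  have hsty : (p0 :: rest2).flatMap (fun note => [get_style note true, get_style note false])
      = ((p0 :: rest2).flatMap (fun p => [(p, true), (p, false)])).map
          (fun d => get_style d.1 d.2) := by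
    simp [List.map_flatMap]
  rw [hsty, hds, List.map_cons]
  rw [PySem.List.pyGet?_zero, ← List.head?_eq_getElem?, pv_sorted_rev_head, Option.getD_some,
      pv_foldl_map_pick (pvRate (p0 :: rest2)) (fun d => get_style d.1 d.2)
        ((p0, false) :: rest2.flatMap (fun p => [(p, true), (p, false)])) (p0, true)]
  -- B side: collapse the first (redundant) self-comparison step, then run the scan lemma
  have hfirst :
      (if PySem.List.pyGetD (if ((p0, true) : Int × Bool).2 = true then maj else mnr)
            ((p0, true) : Int × Bool).1 0 > ((PySem.List.pyGetD maj p0 0, p0, true) : Int × Int × Bool).1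
       then (PySem.List.pyGetD (if ((p0, true) : Int × Bool).2 = true then maj else mnr)
               ((p0, true) : Int × Bool).1 0, ((p0, true) : Int × Bool).1, ((p0, true) : Int × Bool).2)
       else ((PySem.List.pyGetD maj p0 0, p0, true) : Int × Int × Bool))
        = ((PySem.List.pyGetD maj p0 0, p0, true) : Int × Int × Bool) := by
    simp
  conv_rhs => rw [List.foldl_cons, hfirst]
  have hsc : ∀ d ∈ ((p0, true) :: (p0, false) :: rest2.flatMap (fun p => [(p, true), (p, false)])),
      PySem.List.pyGetD (if d.2 = true then maj else mnr) d.1 0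
        = pvRate (p0 :: rest2) (get_style d.1 d.2) := by
    intro d hd
    rw [← hds] at hd
    obtain ⟨a, ha, hda⟩ := List.mem_flatMap.mp hd
    obtain ⟨h0, h1⟩ := hq a ha
    simp only [List.mem_cons, List.not_mem_nil, or_false] at hda
    rcases hda with rfl | rfl
    · show PySem.List.pyGetD maj a 0 = pvRate (p0 :: rest2) (get_style a true)
      rw [hmaj]
      have := pv_table_lookup (p0 :: rest2) a h0 h1 hq true
      simpa using this
    · show PySem.List.pyGetD mnr a 0 = pvRate (p0 :: rest2) (get_style a false)
      rw [hmnr]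
      have := pv_table_lookup (p0 :: rest2) a h0 h1 hq false
      simpa using this
  rw [pv_scan (fun d => PySem.List.pyGetD (if d.2 = true then maj else mnr) d.1 0)
        (fun d => pvRate (p0 :: rest2) (get_style d.1 d.2))
        ((p0, false) :: rest2.flatMap (fun p => [(p, true), (p, false)])) (p0, true)
        (PySem.List.pyGetD maj p0 0, p0, true)
        (fun d hd => hsc d (List.mem_cons_of_mem _ hd))
        (hsc (p0, true) List.mem_cons_self)
        rfl]
  exact pv_get_style_eq _ _

-- ===== VERDICT (by name: the statement is the Claim_ definition above) =====
theorem determine_best_style_spec : Claim_equal_determine_best_style := by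
  unfold Claim_equal_determine_best_style
  intro notes _ hpre
  unfold Spec_determine_best_style
  unfold Pre_determine_best_style at hpre
  obtain ⟨n0, nrest, rfl⟩ := List.exists_cons_of_ne_nil hpre
  exact pv_main n0 nrest
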